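-- pv_equiv track=rewrite | github.com/rhit-mccullrs/csse280_final_project | dataservice.py | get_round_robin_pairings
-- ===== SOURCE A (Python) =====
-- def get_round_robin_pairings(data, current_round):
--     pairings = {}
--     players = []
--     for key in data:
--         players.append(key)
--     num_players = len(players)
--     # Handling odd number of players, so one gets a BYE
--     if num_players % 2 == 1:
--         pairings[players[(num_players-current_round)%num_players]] = "BYE"
--         players.remove(players[(num_players-current_round)%num_players])
--         num_players -= 1
--
--     arr = players[1:num_players//2] + list(reversed(players[num_players//2:num_players]))
--     ref_arr = arr.copy()
--
--     # do algorithm current_round times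
--     for i in range(current_round - 1):
--         for j in range(len(arr)):
--             arr[(j+1)%(num_players-1)] = ref_arr[j]
--         ref_arr = arr.copy()
--
--     # get top and bottom lists to do pairings
--     top = [players[0]] + arr[0:num_players//2-1]
--     bottom = list(reversed(arr[(num_players-1)//2:(num_players-1)]))
--
--     for i in range(len(top)):
--         pairings[top[i]] = bottom[i]
--
--     return pairings
-- ===== SOURCE B (Python) =====
-- def get_round_robin_pairings(data, current_round):
--     # Same pairings; the (current_round-1) one-step shift passes are replaced by a
--     # single modular rotation, so the work is O(n) instead of O(current_round * n).
--     players = list(data)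
--     n = len(players)
--     pairings = {}
--     if n % 2 == 1:
--         bye = players.pop((n - current_round) % n)
--         pairings[bye] = "BYE"
--         n -= 1
--     half = n // 2
--     arr = players[1:half] + list(reversed(players[half:]))
--     m = n - 1
--     k = max(current_round - 1, 0) % m
--     arr = arr[m - k:] + arr[:m - k]
--     top = [players[0]] + arr[:half - 1]
--     bottom = list(reversed(arr[half - 1:]))
--     for t, b in zip(top, bottom):
--         pairings[t] = b
--     return pairings
-- ===== Notes on version B (the rewrite author's own statement) =====
-- stated objective: faster
-- what changed: The (current_round-1) repeated shift-by-one passes over the rotation array are replaced by a single modular rotation by (current_round-1) mod (n-1) done with two slices, and the bye player is removed by index (pop) instead of by value; Pre_ excludes dicts with fewer than two keys, on which both A and B raise IndexError.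
import Mathlib
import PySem

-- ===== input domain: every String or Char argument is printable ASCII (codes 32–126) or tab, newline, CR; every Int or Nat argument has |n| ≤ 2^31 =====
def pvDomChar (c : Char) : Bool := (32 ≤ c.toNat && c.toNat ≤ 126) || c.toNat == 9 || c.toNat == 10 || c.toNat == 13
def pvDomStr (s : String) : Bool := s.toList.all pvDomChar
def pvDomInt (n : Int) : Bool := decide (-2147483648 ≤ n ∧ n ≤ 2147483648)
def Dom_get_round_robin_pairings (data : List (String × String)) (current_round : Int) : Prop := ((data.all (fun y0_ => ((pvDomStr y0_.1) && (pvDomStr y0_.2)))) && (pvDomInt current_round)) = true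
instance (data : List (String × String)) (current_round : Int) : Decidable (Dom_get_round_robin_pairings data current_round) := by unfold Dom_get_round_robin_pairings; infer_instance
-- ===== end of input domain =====

-- B replaces A's (current_round-1) shift-by-one passes with one modular rotation (two
-- slices), and removes the bye player by index instead of by value: same pairings, O(n).


-- ===== PORT A =====
-- A-side helper: the code of A after the odd-number-of-players branch, verbatim
-- (pairings, players, num_players are A's variables at that point).
def pvTailA (pairings : PySem.Dict String String) (players : List String) (num_players : Int)
    (current_round : Int) : List (String × String) :=
  -- arr = players[1:num_players//2] + list(reversed(players[num_players//2:num_players]))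
  let arr := PySem.List.slice players (some 1) (some (PySem.Int.floordiv num_players 2))
      ++ (PySem.List.slice players (some (PySem.Int.floordiv num_players 2)) (some num_players)).reverse
  -- ref_arr = arr.copy()
  -- for i in range(current_round - 1): for j in range(len(arr)): arr[(j+1)%(num_players-1)] = ref_arr[j];
  --   ref_arr = arr.copy()    (loop state = (arr, ref_arr); all indices are in range, so the
  --   total forms pySetD / pyGetD never use their defaults here)
  let arrFin := ((PySem.List.pyRange 0 (current_round - 1) 1).foldl
      (fun (s : List String × List String) _ =>
        let a := (List.range s.1.length).foldl
          (fun a j => PySem.List.pySetD a (PySem.Int.mod ((j : Int) + 1) (num_players - 1))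
            (PySem.List.pyGetD s.2 (j : Int) "")) s.1
        (a, a))
      (arr, arr)).1
  -- top = [players[0]] + arr[0:num_players//2-1]   (players[0] raises on an empty list: Pre_)
  let top := [PySem.List.pyGetD players 0 ""]
      ++ PySem.List.slice arrFin (some 0) (some (PySem.Int.floordiv num_players 2 - 1))
  -- bottom = list(reversed(arr[(num_players-1)//2:(num_players-1)]))
  let bottom := (PySem.List.slice arrFin (some (PySem.Int.floordiv (num_players - 1) 2)) (some (num_players - 1))).reverse
  -- for i in range(len(top)): pairings[top[i]] = bottom[i]
  let pairings := (List.range top.length).foldl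
      (fun d i => d.insert (PySem.List.pyGetD top (i : Int) "") (PySem.List.pyGetD bottom (i : Int) "")) pairings
  pairings.items

def get_round_robin_pairings (data : List (String × String)) (current_round : Int) : List (String × String) :=
  -- pairings = {}; players = [];  for key in data: players.append(key)
  -- (iterating a Python dict yields its distinct keys, first occurrences, in order)
  let players := PySem.List.dedup (data.map Prod.fst)
  let num_players : Int := players.length
  -- if num_players % 2 == 1: pairings[players[(num_players-current_round)%num_players]] = "BYE";
  --   players.remove(...); num_players -= 1   (the index is in range whenever num_players is
  --   odd, so pyGetD's / remove?'s defaults are never used)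
  let st :=
    if PySem.Int.mod num_players 2 == 1 then
      let bye := PySem.List.pyGetD players (PySem.Int.mod (num_players - current_round) num_players) ""
      (((PySem.Dict.empty : PySem.Dict String String).insert bye "BYE"),
        (PySem.List.remove? players bye).getD players, num_players - 1)
    else ((PySem.Dict.empty : PySem.Dict String String), players, num_players)
  pvTailA st.1 st.2.1 st.2.2 current_round

-- ===== PORT B =====
-- B-side helper: the code of B after the bye branch, verbatim.
def pvTailB (pairings : PySem.Dict String String) (players : List String) (n : Int)
    (current_round : Int) : List (String × String) :=
  -- half = n // 2; arr = players[1:half] + list(reversed(players[half:]))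
  let half := PySem.Int.floordiv n 2
  let arr := PySem.List.slice players (some 1) (some half)
      ++ (PySem.List.slice players (some half) none).reverse
  -- m = n - 1; k = max(current_round - 1, 0) % m; arr = arr[m-k:] + arr[:m-k]
  let m := n - 1
  let k := PySem.Int.mod (max (current_round - 1) 0) m
  let arr2 := PySem.List.slice arr (some (m - k)) none ++ PySem.List.slice arr none (some (m - k))
  -- top = [players[0]] + arr[:half-1]; bottom = list(reversed(arr[half-1:]))
  let top := PySem.List.pyGetD players 0 "" :: PySem.List.slice arr2 none (some (half - 1))
  let bottom := (PySem.List.slice arr2 (some (half - 1)) none).reverse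
  -- for t, b in zip(top, bottom): pairings[t] = b
  ((top.zip bottom).foldl (fun d p => d.insert p.1 p.2) pairings).items

def get_round_robin_pairings_alt (data : List (String × String)) (current_round : Int) : List (String × String) :=
  -- players = list(data); n = len(players); pairings = {}
  let players := PySem.List.dedup (data.map Prod.fst)
  let n : Int := players.length
  -- if n % 2 == 1: bye = players.pop((n - current_round) % n); pairings[bye] = "BYE"; n -= 1
  -- (the pop index is in range whenever n is odd, so pop?'s default is never used)
  let st :=
    if PySem.Int.mod n 2 == 1 then
      let pr := (PySem.List.pop? players (PySem.Int.mod (n - current_round) n)).getD ("", players)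
      (((PySem.Dict.empty : PySem.Dict String String).insert pr.1 "BYE"), pr.2, n - 1)
    else ((PySem.Dict.empty : PySem.Dict String String), players, n)
  pvTailB st.1 st.2.1 st.2.2 current_round

-- ===== PRECONDITION & SPEC =====
-- Pre_ excludes dicts with fewer than two (distinct) keys: there A reaches players[0] on an
-- empty or emptied list and raises IndexError (B raises as well).
def Pre_get_round_robin_pairings (data : List (String × String)) (current_round : Int) : Prop :=
  2 ≤ (PySem.List.dedup (data.map Prod.fst)).length
instance (data : List (String × String)) (current_round : Int) : Decidable (Pre_get_round_robin_pairings data current_round) := by unfold Pre_get_round_robin_pairings; infer_instance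
def pvWitness_get_round_robin_pairings : (List (String × String)) × Int := ([("a", "1"), ("b", "2")], 1)
def Spec_get_round_robin_pairings (data : List (String × String)) (current_round : Int) (out : List (String × String)) : Prop := out = get_round_robin_pairings_alt data current_round
instance (data : List (String × String)) (current_round : Int) (out : List (String × String)) : Decidable (Spec_get_round_robin_pairings data current_round out) := by unfold Spec_get_round_robin_pairings; infer_instance

-- ===== CLAIM (what is proved, stated in full; the proofs are below) =====
def Claim_equal_get_round_robin_pairings : Prop := ∀ (data : List (String × String)) (current_round : Int), Dom_get_round_robin_pairings data current_round → Pre_get_round_robin_pairings data current_round → Spec_get_round_robin_pairings data current_round (get_round_robin_pairings data current_round)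

-- ===== LEMMAS AND PROOFS =====

theorem pv_inner_partial (l : List String) (M t : Nat) (hl : l.length = M) (ht : t < M) :
    (List.range t).foldl
      (fun a (j : Nat) => PySem.List.pySetD a (PySem.Int.mod ((j : Int) + 1) (M : Int))
        (PySem.List.pyGetD l (j : Int) "")) l
    = l.take 1 ++ l.take t ++ l.drop (t + 1) := by
  induction t with
  | zero =>
    simp only [List.range_zero, List.foldl_nil, List.take_zero, List.append_nil]
    exact (List.take_append_drop 1 l).symm
  | succ t ih =>
    have ht' : t < M := by omega
    rw [List.range_succ, List.foldl_append, ih ht']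
    simp only [List.foldl_cons, List.foldl_nil]
    have hidx : PySem.Int.mod ((t : Int) + 1) (M : Int) = ((t + 1 : Nat) : Int) := by
      have h : ((t : Int) + 1) = ((t + 1 : Nat) : Int) := by push_cast; ring
      rw [h, PySem.Int.mod_natCast, Nat.mod_eq_of_lt ht]
    have hval : PySem.List.pyGetD l (t : Int) "" = l[t]'(by omega) := by
      rw [PySem.List.pyGetD_natCast, List.getD_eq_getElem _ _ (by omega)]
    rw [hidx, hval, PySem.List.pySetD_natCast]
    rw [show l.take 1 ++ l.take t ++ l.drop (t + 1)
        = (l.take 1 ++ l.take t) ++ l.drop (t + 1) from by simp [List.append_assoc]]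
    rw [List.set_append_right _ _ (by simp [List.length_take]; omega)]
    have hlen : (l.take 1 ++ l.take t).length = t + 1 := by
      simp [List.length_take]; omega
    rw [hlen, Nat.sub_self]
    rw [List.drop_eq_getElem_cons (by omega : t + 1 < l.length)]
    simp only [List.set_cons_zero]
    have htake : l.take (t + 1) = l.take t ++ [l[t]'(by omega)] := by
      rw [List.take_add_one]
      congr 1
      simp [List.getElem?_eq_getElem (by omega : t < l.length)]
    rw [htake]
    simp only [List.append_assoc, List.singleton_append]

theorem pv_inner (l : List String) (M : Nat) (hl : l.length = M) (hM : 1 ≤ M) :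
    (List.range l.length).foldl
      (fun a (j : Nat) => PySem.List.pySetD a (PySem.Int.mod ((j : Int) + 1) (M : Int))
        (PySem.List.pyGetD l (j : Int) "")) l
    = l.rotate (M - 1) := by
  have hM' : M - 1 + 1 = M := by omega
  rw [hl, show List.range M = List.range (M - 1) ++ [M - 1] from by
      rw [← List.range_succ]; congr 1; omega,
    List.foldl_append, pv_inner_partial l M (M - 1) hl (by omega)]
  simp only [List.foldl_cons, List.foldl_nil]
  have hidx : PySem.Int.mod (((M - 1 : Nat) : Int) + 1) (M : Int) = ((0 : Nat) : Int) := by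
    have h : (((M - 1 : Nat) : Int) + 1) = ((M : Nat) : Int) := by omega
    rw [h, PySem.Int.mod_natCast, Nat.mod_self]
  have hval : PySem.List.pyGetD l ((M - 1 : Nat) : Int) "" = l[M - 1]'(by omega) := by
    rw [PySem.List.pyGetD_natCast, List.getD_eq_getElem _ _ (by omega)]
  rw [hidx, hval, PySem.List.pySetD_natCast]
  rw [List.drop_eq_nil_of_le (by omega : l.length ≤ M - 1 + 1), List.append_nil]
  have htake1 : l.take 1 = [l[0]'(by omega)] := by
    cases l with
    | nil => simp at hl; omega
    | cons a l => simp
  rw [htake1]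
  simp only [List.singleton_append, List.set_cons_zero]
  rw [List.rotate_eq_drop_append_take (by omega)]
  have hdrop : l.drop (M - 1) = [l[M - 1]'(by omega)] := by
    rw [List.drop_eq_getElem_cons (by omega : M - 1 < l.length)]
    rw [List.drop_eq_nil_of_le (by omega : l.length ≤ M - 1 + 1)]
  rw [hdrop]
  simp

theorem pv_fold_cast (t : Nat) (f : List String → Int → List String) (l : List String) :
    (List.foldl f l do let a ← List.range t; pure ((a : Int)))
    = (List.range t).foldl (fun a (j : Nat) => f a ((j : Nat) : Int)) l := by
  simp only [List.pure_def, List.bind_eq_flatMap]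
  rw [← List.map_eq_flatMap, List.foldl_map]

theorem pv_outer (L : List Int) (l : List String) (M : Nat) (hl : l.length = M) (hM : 1 ≤ M) :
    (L.foldl
      (fun (s : List String × List String) _ =>
        let a := (List.range s.1.length).foldl
          (fun a j => PySem.List.pySetD a (PySem.Int.mod ((j : Int) + 1) (M : Int))
            (PySem.List.pyGetD s.2 (j : Int) "")) s.1
        (a, a))
      (l, l)).1
    = l.rotate ((M - 1) * L.length) := by
  induction L generalizing l with
  | nil => simp
  | cons x L ih =>
    simp only [List.foldl_cons]
    have hstep : (List.range l.length).foldl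
        (fun a (j : Int) => PySem.List.pySetD a (PySem.Int.mod (j + 1) (M : Int))
          (PySem.List.pyGetD l j "")) l = l.rotate (M - 1) := by
      rw [pv_fold_cast]
      exact pv_inner l M hl hM
    rw [hstep, ih (l.rotate (M - 1)) (by simp [hl])]
    rw [List.rotate_rotate]
    congr 1
    simp [List.length_cons, Nat.mul_succ]
    ring

theorem pv_mod_arith (M N : Nat) (hM : 1 ≤ M) : ((M - 1) * N) % M = (M - N % M) % M := by
  set K := N % M with hK
  have h1 : ((M - 1) * N) % M = ((M - 1) * K) % M := by
    have h := (Nat.mod_modEq N M).symm.mul_left (M - 1)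
    simp only [Nat.ModEq, ← hK] at h
    exact h
  rw [h1]
  rcases Nat.eq_zero_or_pos K with h0 | hpos
  · simp [h0, Nat.mod_self]
  · have hKM : K < M := by rw [hK]; exact Nat.mod_lt _ (by omega)
    have e : (M - 1) * K = (M - K) + (K - 1) * M := by
      zify [hM, hpos, hKM.le]; ring
    rw [e, Nat.add_mul_mod_self_right]

theorem pv_fold_zip (t b : List String) (d : PySem.Dict String String) (h : t.length = b.length) :
    (List.range t.length).foldl
      (fun d i => d.insert (PySem.List.pyGetD t (i : Int) "") (PySem.List.pyGetD b (i : Int) "")) d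
    = (t.zip b).foldl (fun d p => d.insert p.1 p.2) d := by
  induction t generalizing b d with
  | nil => simp
  | cons x t ih =>
    cases b with
    | nil => simp at h
    | cons y b =>
      simp only [List.length_cons, List.range_succ_eq_map, List.foldl_cons, List.foldl_map,
        List.zip_cons_cons, PySem.List.pyGetD_natCast, List.getD_cons_succ, List.getD_cons_zero]
      have ih' := ih b (d.insert x y) (by simpa using h)
      simp only [PySem.List.pyGetD_natCast] at ih'
      exact ih'

-- The shared tail: for an even number 2 ≤ n of remaining players both tails agree.
theorem pv_core (d0 : PySem.Dict String String) (Q : List String) (n r : Int)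
    (hlen : Q.length = n.toNat) (h2 : 2 ≤ n) (heven : PySem.Int.mod n 2 = 0) :
    pvTailA d0 Q n r = pvTailB d0 Q n r := by
  have hn : n = (Q.length : Int) := by omega
  subst hn
  set L := Q.length with hLdef
  have hLeven : L % 2 = 0 := by
    have h := heven
    rw [show (2 : Int) = ((2 : Nat) : Int) from rfl, PySem.Int.mod_natCast] at h
    exact_mod_cast h
  have hL2 : 2 ≤ L := by exact_mod_cast h2
  simp only [pvTailA, pvTailB]
  -- normalise the Int arithmetic to casts of Nat values
  have h2c : (2 : Int) = ((2 : Nat) : Int) := rfl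
  have h_half : PySem.Int.floordiv ((L : Nat) : Int) 2 = ((L / 2 : Nat) : Int) := by
    rw [h2c, PySem.Int.floordiv_natCast]
  rw [h_half]
  have h_sub1 : ((L : Nat) : Int) - 1 = ((L - 1 : Nat) : Int) := by omega
  rw [h_sub1]
  have h_fd2 : PySem.Int.floordiv ((L - 1 : Nat) : Int) 2 = ((L / 2 - 1 : Nat) : Int) := by
    rw [h2c, PySem.Int.floordiv_natCast]; congr 1; omega
  rw [h_fd2]
  have h_half1 : ((L / 2 : Nat) : Int) - 1 = ((L / 2 - 1 : Nat) : Int) := by omega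
  rw [h_half1]
  have hmax : max (r - 1) 0 = (((r - 1).toNat : Nat) : Int) := (Int.ofNat_toNat _).symm
  rw [hmax]
  rw [PySem.Int.mod_natCast]
  set N' := (r - 1).toNat with hN'
  set K := N' % (L - 1) with hK
  have hKlt : K < L - 1 := Nat.mod_lt _ (by omega)
  have h_mk : ((L - 1 : Nat) : Int) - ((K : Nat) : Int) = ((L - 1 - K : Nat) : Int) := by omega
  rw [h_mk]
  -- the two arr initialisations agree
  have E1 : PySem.List.slice Q (some ((L / 2 : Nat) : Int)) (some ((L : Nat) : Int))
      = PySem.List.slice Q (some ((L / 2 : Nat) : Int)) none := by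
    rw [PySem.List.slice_natCast, PySem.List.slice_from_natCast]
    apply List.take_of_length_le
    simp
    omega
  rw [E1]
  set arrQ := PySem.List.slice Q (some 1) (some ((L / 2 : Nat) : Int))
      ++ (PySem.List.slice Q (some ((L / 2 : Nat) : Int)) none).reverse with harr
  have hlenarr : arrQ.length = L - 1 := by
    rw [harr]
    rw [show (1 : Int) = ((1 : Nat) : Int) from rfl, PySem.List.slice_natCast,
      PySem.List.slice_from_natCast]
    simp
    omega
  have hrot := pv_outer (PySem.List.pyRange 0 (r - 1) 1) arrQ (L - 1) hlenarr (by omega)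
  rw [hrot]
  rw [PySem.List.length_pyRange_one]
  have hNN : (r - 1 - 0).toNat = N' := by rw [hN']; omega
  rw [hNN]
  have hrots : arrQ.rotate ((L - 1 - 1) * N') = arrQ.rotate (L - 1 - K) := by
    rw [← List.rotate_mod arrQ ((L - 1 - 1) * N'), ← List.rotate_mod arrQ (L - 1 - K),
      hlenarr]
    congr 1
    exact pv_mod_arith (L - 1) N' (by omega)
  rw [hrots]
  rw [PySem.List.slice_from_natCast arrQ (L - 1 - K),
    PySem.List.slice_to_natCast arrQ (L - 1 - K)]
  rw [show arrQ.drop (L - 1 - K) ++ arrQ.take (L - 1 - K) = arrQ.rotate (L - 1 - K) from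
    (List.rotate_eq_drop_append_take (by omega)).symm]
  set R := arrQ.rotate (L - 1 - K) with hR
  have hlenR : R.length = L - 1 := by rw [hR, List.length_rotate, hlenarr]
  rw [PySem.List.slice_zero_start]
  rw [PySem.List.slice_natCast R (L / 2 - 1) (L - 1), PySem.List.slice_to_natCast]
  have E2 : (R.drop (L / 2 - 1)).take (L - 1 - (L / 2 - 1)) = R.drop (L / 2 - 1) := by
    apply List.take_of_length_le
    simp [hlenR]
  rw [E2, List.singleton_append]
  rw [pv_fold_zip _ _ d0 (by simp [hlenR]; omega)]
  rw [PySem.List.slice_from_natCast R (L / 2 - 1)]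

-- ===== VERDICT (by name: the statement is the Claim_ definition above) =====
theorem get_round_robin_pairings_spec : Claim_equal_get_round_robin_pairings := by
  intro data r _hDom hPre
  unfold Spec_get_round_robin_pairings
  unfold Pre_get_round_robin_pairings at hPre
  unfold get_round_robin_pairings get_round_robin_pairings_alt
  set P := PySem.List.dedup (data.map Prod.fst) with hP
  have hnd : P.Nodup := PySem.List.nodup_dedup _
  have hL2 : 2 ≤ P.length := hPre
  have hmn : PySem.Int.mod ((P.length : Nat) : Int) 2 = ((P.length % 2 : Nat) : Int) := by
    rw [show (2 : Int) = ((2 : Nat) : Int) from rfl, PySem.Int.mod_natCast]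
  by_cases hodd : PySem.Int.mod (P.length : Int) 2 = 1
  · -- odd number of players: both ports remove the same bye player
    have hb : (PySem.Int.mod ((P.length : Nat) : Int) 2 == 1) = true := by
      simp only [beq_iff_eq]; exact hodd
    simp only [hb, if_true]
    have hLodd : P.length % 2 = 1 := by rw [hmn] at hodd; omega
    set idx := PySem.Int.mod ((P.length : Nat) - r) (P.length : Int) with hidx
    have h0 : 0 ≤ idx := PySem.Int.mod_nonneg _ (by exact_mod_cast Nat.lt_of_lt_of_le Nat.zero_lt_two hL2)
    have hlt : idx < (P.length : Int) := PySem.Int.mod_lt _ (by exact_mod_cast Nat.lt_of_lt_of_le Nat.zero_lt_two hL2)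
    have hI : idx.toNat < P.length := by omega
    have hbye : PySem.List.pyGetD P idx "" = P[idx.toNat] :=
      PySem.List.pyGetD_eq_getElem P "" h0 hlt
    have hrem : (PySem.List.remove? P P[idx.toNat]).getD P = P.eraseIdx idx.toNat := by
      rw [PySem.List.remove?_eq_some_erase P _ (List.getElem_mem hI), Option.getD_some]
      exact hnd.erase_getElem idx.toNat hI
    have hpop : PySem.List.pop? P idx = some (P[idx.toNat], P.eraseIdx idx.toNat) := by
      have h := PySem.List.pop?_natCast P idx.toNat hI
      rwa [Int.toNat_of_nonneg h0] at h
    simp only [hbye, hrem, hpop, Option.getD_some]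
    exact pv_core _ _ _ _ (by simp [List.length_eraseIdx, hI]) (by omega)
      (by rw [show ((P.length : Nat) : Int) - 1 = ((P.length - 1 : Nat) : Int) from by omega,
            show (2 : Int) = ((2 : Nat) : Int) from rfl, PySem.Int.mod_natCast]
          have h1 : (P.length - 1) % 2 = 0 := by omega
          rw [h1]
          rfl)
  · -- even number of players
    have hb : (PySem.Int.mod ((P.length : Nat) : Int) 2 == 1) = false := by
      simp only [beq_eq_false_iff_ne, ne_eq]; exact hodd
    simp only [hb, Bool.false_eq_true, if_false]
    exact pv_core _ _ _ _ (by simp) (by exact_mod_cast hL2)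
      (by rw [hmn] at hodd ⊢; omega)
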